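-- pv_equiv track=rewrite | github.com/hetsondagar/pastport | pastport-ml-service/app/topic_model.py | _map_terms_to_themes
-- ===== SOURCE A (Python) =====
-- from typing import List
--
-- THEME_KEYWORDS = {
--     "career": ["intern", "job", "career", "work", "office", "resume", "interview", "boss", "team", "project"],
--     "relationships": ["friend", "friends", "relationship", "partner", "girlfriend", "boyfriend", "family", "mom", "dad", "sister", "brother"],
--     "health": ["sleep", "diet", "exercise", "gym", "health", "doctor", "anxiety", "stress", "panic", "therapy"],
--     "learning": ["study", "learn", "class", "course", "homework", "exam", "school", "college", "practice", "skill"],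
--     "stress": ["stress", "overwhelmed", "burnout", "tired", "pressure", "worried", "scared", "deadline"],
--     "goals": ["goal", "plan", "dream", "future", "commit", "habit", "discipline", "progress", "improve"],
-- }
--
-- def _map_terms_to_themes(terms: List[str]) -> List[str]:
--     term_set = set(terms)
--     scored = []
--     for theme, kws in THEME_KEYWORDS.items():
--         overlap = sum(1 for k in kws if k in term_set)
--         if overlap > 0:
--             scored.append((theme, overlap))
--     scored.sort(key=lambda x: x[1], reverse=True)
--     return [t for t, _ in scored]
-- ===== SOURCE B (Python) =====
-- from typing import List
--
-- THEME_KEYWORDS = {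
--     "career": ["intern", "job", "career", "work", "office", "resume", "interview", "boss", "team", "project"],
--     "relationships": ["friend", "friends", "relationship", "partner", "girlfriend", "boyfriend", "family", "mom", "dad", "sister", "brother"],
--     "health": ["sleep", "diet", "exercise", "gym", "health", "doctor", "anxiety", "stress", "panic", "therapy"],
--     "learning": ["study", "learn", "class", "course", "homework", "exam", "school", "college", "practice", "skill"],
--     "stress": ["stress", "overwhelmed", "burnout", "tired", "pressure", "worried", "scared", "deadline"],
--     "goals": ["goal", "plan", "dream", "future", "commit", "habit", "discipline", "progress", "improve"],
-- }
--
-- # Inverted index, built once: keyword -> list of themes whose keyword list contains it.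
-- _PAIRS = [(k, theme) for theme, kws in THEME_KEYWORDS.items() for k in kws]
-- _INVERTED = {}
-- for _k, _theme in _PAIRS:
--     _INVERTED.setdefault(_k, []).append(_theme)
--
--
-- def _map_terms_to_themes(terms: List[str]) -> List[str]:
--     counts = {}
--     for t in set(terms):
--         for theme in _INVERTED.get(t, []):
--             counts[theme] = counts.get(theme, 0) + 1
--     scored = [(theme, counts.get(theme, 0)) for theme in THEME_KEYWORDS if counts.get(theme, 0) > 0]
--     scored.sort(key=lambda x: x[1], reverse=True)
--     return [t for t, _ in scored]
-- ===== Notes on version B (the rewrite author's own statement) =====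
-- stated objective: alternative
-- what changed: B precomputes a constant inverted index (keyword -> themes) and tallies theme counts in one pass over the distinct terms, instead of A's per-theme scan of every keyword list against the term set; the scored list is then rebuilt in THEME_KEYWORDS order and stably reverse-sorted as before.
import Mathlib
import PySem

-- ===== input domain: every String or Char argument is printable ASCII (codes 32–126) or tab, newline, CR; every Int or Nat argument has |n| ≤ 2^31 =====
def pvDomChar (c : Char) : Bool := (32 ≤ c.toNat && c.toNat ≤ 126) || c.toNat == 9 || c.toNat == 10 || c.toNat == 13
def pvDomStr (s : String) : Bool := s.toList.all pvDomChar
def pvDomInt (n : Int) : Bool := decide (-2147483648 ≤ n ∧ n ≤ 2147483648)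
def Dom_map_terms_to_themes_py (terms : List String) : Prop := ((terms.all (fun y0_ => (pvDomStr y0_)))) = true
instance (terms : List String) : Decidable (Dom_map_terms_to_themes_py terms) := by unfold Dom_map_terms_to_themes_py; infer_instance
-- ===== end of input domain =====

-- B replaces the per-theme scan over keyword lists by a precomputed inverted index
-- (keyword -> themes) consulted once per distinct term; same output (objective: alternative).

-- ===== PORT A =====
-- THEME_KEYWORDS (module constant; shared verbatim by both versions)
def pvThemeKeywords : List (String × List String) :=
  [("career", ["intern", "job", "career", "work", "office", "resume", "interview", "boss", "team", "project"]),
   ("relationships", ["friend", "friends", "relationship", "partner", "girlfriend", "boyfriend", "family", "mom", "dad", "sister", "brother"]),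
   ("health", ["sleep", "diet", "exercise", "gym", "health", "doctor", "anxiety", "stress", "panic", "therapy"]),
   ("learning", ["study", "learn", "class", "course", "homework", "exam", "school", "college", "practice", "skill"]),
   ("stress", ["stress", "overwhelmed", "burnout", "tired", "pressure", "worried", "scared", "deadline"]),
   ("goals", ["goal", "plan", "dream", "future", "commit", "habit", "discipline", "progress", "improve"])]

def map_terms_to_themes_py (terms : List String) : List String :=
  let term_set : PySem.Set String := PySem.Set.ofList terms
  let scored : List (String × Int) :=
    pvThemeKeywords.foldl (fun scored p =>
      let overlap : Int := p.2.foldl (fun n k => if term_set.contains k then n + 1 else n) 0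
      if overlap > 0 then scored ++ [(p.1, overlap)] else scored) []
  (PySem.List.sorted scored (fun x => x.2) true).map (fun x => x.1)

-- ===== PORT B =====
-- _PAIRS: flat (keyword, theme) list
def pvPairs : List (String × String) :=
  pvThemeKeywords.flatMap (fun p => p.2.map (fun k => (k, p.1)))

-- _INVERTED: keyword -> list of themes containing it (setdefault(k, []).append(theme))
def pvInverted : PySem.Dict String (List String) :=
  pvPairs.foldl (fun d q => d.modify q.1 [] (fun l => l ++ [q.2])) PySem.Dict.empty

-- the counts loop of B (counts[theme] = counts.get(theme, 0) + 1 over distinct terms)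
def pvCountsB (terms : List String) : PySem.Dict String Int :=
  (PySem.Set.ofList terms).foldl (fun d t =>
    (pvInverted.getD t []).foldl (fun d theme => d.modify theme 0 (fun c => c + 1)) d)
    PySem.Dict.empty

def map_terms_to_themes_py_alt (terms : List String) : List String :=
  let counts := pvCountsB terms
  let scored : List (String × Int) :=
    (pvThemeKeywords.map (fun p => p.1)).filterMap (fun theme =>
      if counts.getD theme 0 > 0 then some (theme, counts.getD theme 0) else none)
  (PySem.List.sorted scored (fun x => x.2) true).map (fun x => x.1)

-- ===== PRECONDITION & SPEC =====
def Spec_map_terms_to_themes_py (terms : List String) (out : List String) : Prop := out = map_terms_to_themes_py_alt terms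
instance (terms : List String) (out : List String) : Decidable (Spec_map_terms_to_themes_py terms out) := by unfold Spec_map_terms_to_themes_py; infer_instance

-- ===== CLAIM (what is proved, stated in full; the proofs are below) =====
def Claim_equal_map_terms_to_themes_py : Prop := ∀ (terms : List String), Dom_map_terms_to_themes_py terms → Spec_map_terms_to_themes_py terms (map_terms_to_themes_py terms)

-- ===== LEMMAS AND PROOFS =====

-- counting loop with an if-guard = countP
theorem pv_foldl_if_add (p : String → Bool) : ∀ (l : List String) (n : Int),
    l.foldl (fun n k => if p k then n + 1 else n) n = n + l.countP p := by
  intro l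
  induction l with
  | nil => intro n; simp
  | cons a l ih =>
    intro n
    simp only [List.foldl_cons, List.countP_cons, ih]
    by_cases h : p a = true <;> simp [h] <;> push_cast <;> ring

-- the nested counting fold of B, characterised per key
theorem pv_counts_getD (th : String) : ∀ (S : List String) (d : PySem.Dict String Int),
    (S.foldl (fun d t =>
        (pvInverted.getD t []).foldl (fun d theme => d.modify theme 0 (fun c => c + 1)) d) d).getD th 0
      = d.getD th 0 + ((S.map (fun t => (pvInverted.getD t []).count th)).sum : Nat) := by
  intro S
  induction S with
  | nil => intro d; simp
  | cons t S ih =>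
    intro d
    simp only [List.foldl_cons, List.map_cons, List.sum_cons]
    rw [ih, PySem.Dict.getD_foldl_modify_add_one]
    push_cast; ring

-- how often the inverted index credits theme `th` for term `t` = how often `t` occurs in th's keywords
theorem pv_invCount (th : String) (kws : List String)
    (hk : (pvPairs.filter (fun q => q.2 == th)).map (fun q => q.1) = kws) (t : String) :
    (pvInverted.getD t []).count th = kws.count t := by
  subst hk
  have h1 : pvInverted.getD t []
      = (pvPairs.filter (fun q => q.1 == t)).map (fun q => q.2) := by
    unfold pvInverted
    rw [PySem.Dict.getD_foldl_modify_append]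
    rfl
  rw [h1]
  have e1 : ∀ (X : List String) (a : String), X.count a = X.countP (fun x => x == a) :=
    fun _ _ => rfl
  rw [e1, e1, List.countP_map, List.countP_map, List.countP_filter, List.countP_filter]
  exact List.countP_congr (fun q _ => by
    simp only [Function.comp]
    constructor <;> (intro h; simp_all))

-- the double count exchange: Σ_{t∈l1} count(t, l2) = Σ_{k∈l2} count(k, l1)
theorem pv_sum_count_comm : ∀ (l1 l2 : List String),
    (l1.map (fun t => l2.count t)).sum = (l2.map (fun k => l1.count k)).sum := by
  intro l1
  induction l1 with
  | nil => intro l2; simp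
  | cons a l1 ih =>
    intro l2
    simp only [List.map_cons, List.sum_cons, ih]
    have hc : ∀ k : String, List.count k (a :: l1) = l1.count k + (if a == k then 1 else 0) :=
      fun k => List.count_cons
    simp only [hc]
    rw [List.sum_map_add]
    have h2 : ∀ l2 : List String, (l2.map (fun k => if a == k then 1 else 0)).sum = l2.count a := by
      intro l2
      induction l2 with
      | nil => simp
      | cons b l2 ih2 =>
        simp only [List.map_cons, List.sum_cons, ih2, List.count_cons]
        by_cases hb : a = b
        · subst hb; simp [Nat.add_comm]
        · have hb1 : (a == b) = false := by simp [hb]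
          have hb2 : (b == a) = false := by simp [Ne.symm hb]
          simp [hb1, hb2]
    rw [h2]
    omega

-- Σ over a nodup list of counts = countP of a membership predicate
theorem pv_sum_count_nodup (p : String → Bool) : ∀ (kws S : List String), S.Nodup →
    (∀ k, p k = true ↔ k ∈ S) →
    (kws.map (fun k => S.count k)).sum = kws.countP p := by
  intro kws
  induction kws with
  | nil => intro S _ _; simp
  | cons k kws ih =>
    intro S h hp
    simp only [List.map_cons, List.sum_cons, List.countP_cons, ih S h hp]
    by_cases hm : k ∈ S
    · rw [List.count_eq_one_of_mem h hm]
      have : p k = true := (hp k).mpr hm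
      simp [this, Nat.add_comm]
    · rw [List.count_eq_zero_of_not_mem hm]
      have : ¬ p k = true := fun hh => hm ((hp k).mp hh)
      simp [this]

-- per-theme bridge: B's counter entry = A's overlap loop
theorem pv_key_eq (terms : List String) (th : String) (kws : List String)
    (hk : (pvPairs.filter (fun q => q.2 == th)).map (fun q => q.1) = kws) :
    (pvCountsB terms).getD th 0
      = kws.foldl (fun n k => if (PySem.Set.ofList terms).contains k then n + 1 else n) (0 : Int) := by
  rw [pv_foldl_if_add]
  unfold pvCountsB
  rw [pv_counts_getD]
  have h0 : (PySem.Dict.empty : PySem.Dict String Int).getD th 0 = 0 := rfl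
  rw [h0]
  have hinv : ∀ t, (pvInverted.getD t []).count th = kws.count t := pv_invCount th kws hk
  simp only [hinv]
  rw [pv_sum_count_comm]
  rw [pv_sum_count_nodup (fun k => (PySem.Set.ofList terms).contains k) kws (PySem.Set.ofList terms)
        (PySem.Set.nodup_ofList terms) (fun k => by simp [PySem.Set.contains])]

-- the two scored-list constructions agree once the counts agree per theme
theorem pv_build_eq (S : PySem.Set String) (counts : PySem.Dict String Int) :
    ∀ (ts : List (String × List String)),
    (∀ p ∈ ts, counts.getD p.1 0
        = p.2.foldl (fun n k => if S.contains k then n + 1 else n) (0 : Int)) →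
    ∀ acc : List (String × Int),
    ts.foldl (fun scored p =>
        let overlap : Int := p.2.foldl (fun n k => if S.contains k then n + 1 else n) 0
        if overlap > 0 then scored ++ [(p.1, overlap)] else scored) acc
      = acc ++ (ts.map (fun p => p.1)).filterMap (fun theme =>
          if counts.getD theme 0 > 0 then some (theme, counts.getD theme 0) else none) := by
  intro ts
  induction ts with
  | nil => intro _ acc; simp
  | cons p ts ih =>
    intro h acc
    have hp : counts.getD p.1 0
        = p.2.foldl (fun n k => if S.contains k then n + 1 else n) (0 : Int) :=
      h p (List.mem_cons_self ..)
    have hts : ∀ q ∈ ts, counts.getD q.1 0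
        = q.2.foldl (fun n k => if S.contains k then n + 1 else n) (0 : Int) :=
      fun q hq => h q (List.mem_cons_of_mem _ hq)
    simp only [List.foldl_cons, List.map_cons, List.filterMap_cons, ← hp]
    by_cases hc : counts.getD p.1 0 > 0
    · simp only [if_pos hc, ih hts, List.append_assoc, List.singleton_append]
    · simp only [if_neg hc, ih hts]

-- ===== VERDICT (by name: the statement is the Claim_ definition above) =====
theorem map_terms_to_themes_py_spec : Claim_equal_map_terms_to_themes_py := by
  unfold Claim_equal_map_terms_to_themes_py
  intro terms _
  unfold Spec_map_terms_to_themes_py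
  simp only [map_terms_to_themes_py, map_terms_to_themes_py_alt]
  rw [pv_build_eq (PySem.Set.ofList terms) (pvCountsB terms) pvThemeKeywords
        (by
          intro p hp
          fin_cases hp
          · exact pv_key_eq terms "career" ["intern", "job", "career", "work", "office", "resume", "interview", "boss", "team", "project"] (by decide)
          · exact pv_key_eq terms "relationships" ["friend", "friends", "relationship", "partner", "girlfriend", "boyfriend", "family", "mom", "dad", "sister", "brother"] (by decide)
          · exact pv_key_eq terms "health" ["sleep", "diet", "exercise", "gym", "health", "doctor", "anxiety", "stress", "panic", "therapy"] (by decide)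
          · exact pv_key_eq terms "learning" ["study", "learn", "class", "course", "homework", "exam", "school", "college", "practice", "skill"] (by decide)
          · exact pv_key_eq terms "stress" ["stress", "overwhelmed", "burnout", "tired", "pressure", "worried", "scared", "deadline"] (by decide)
          · exact pv_key_eq terms "goals" ["goal", "plan", "dream", "future", "commit", "habit", "discipline", "progress", "improve"] (by decide))
        [], List.nil_append]
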